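-- pv_equiv track=rewrite | github.com/mnk-q/ai-ca709 | 8_queen.py | generate_neighbours_with_heuristic
-- ===== SOURCE A (Python) =====
-- def heuristic(board):
--     '''
--     Calculate Heuristic of the current board.
--     It is number of pairs of queens that are attacking each other.
--     '''
--     h = 0
--     for i in range(8):
--         for j in range(i+1, 8):
--             if board[i] == board[j]:
--                 h += 1
--             if abs(i-j) == abs(board[i]-board[j]):
--                 h += 1
--     return h
--
-- def generate_neighbours_with_heuristic(board):
--     neighbours_heuristics = []
--     for i in range(8):
--         for j in range(8):
--             if board[i] != j:
--                 new_board = board[:]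
--                 new_board[i] = j
--                 neighbours_heuristics.append((new_board, heuristic(new_board)))
--     neighbours_heuristics.sort(key=lambda x: x[1])
--     return neighbours_heuristics
-- ===== SOURCE B (Python) =====
-- def _conflicts(board):
--     # Tabulate queens by row, main diagonal and anti-diagonal; attacking pairs
--     # are pairs falling in the same bucket, so sum c*(c-1)//2 over bucket sizes.
--     rows, diag, anti = {}, {}, {}
--     for i in range(8):
--         v = board[i]
--         rows[v] = rows.get(v, 0) + 1
--         diag[i - v] = diag.get(i - v, 0) + 1
--         anti[i + v] = anti.get(i + v, 0) + 1
--     total = 0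
--     for d in (rows, diag, anti):
--         for c in d.values():
--             total += c * (c - 1) // 2
--     return total
--
-- def generate_neighbours_with_heuristic(board):
--     boards = [board[:i] + [j] + board[i+1:]
--               for i in range(8) for j in range(8) if board[i] != j]
--     return sorted(((nb, _conflicts(nb)) for nb in boards), key=lambda p: p[1])
-- ===== Notes on version B (the rewrite author's own statement) =====
-- stated objective: alternative
-- what changed: The heuristic counts attacking pairs by tabulating queens into row/diagonal/anti-diagonal frequency buckets and summing c*(c-1)//2 instead of scanning all 28 queen pairs, and the generator builds neighbour boards by slicing in a comprehension and uses sorted() instead of append+in-place sort.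
import Mathlib
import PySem

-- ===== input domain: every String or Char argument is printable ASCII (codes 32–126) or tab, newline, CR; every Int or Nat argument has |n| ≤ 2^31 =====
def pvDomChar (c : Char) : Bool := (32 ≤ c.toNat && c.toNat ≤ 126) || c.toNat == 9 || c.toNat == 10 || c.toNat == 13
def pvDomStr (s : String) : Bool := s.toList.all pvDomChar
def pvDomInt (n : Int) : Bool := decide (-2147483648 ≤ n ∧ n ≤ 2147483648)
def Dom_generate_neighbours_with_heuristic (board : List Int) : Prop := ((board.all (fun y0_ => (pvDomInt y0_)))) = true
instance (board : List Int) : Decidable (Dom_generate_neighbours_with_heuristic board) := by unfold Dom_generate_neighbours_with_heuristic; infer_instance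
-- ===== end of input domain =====

-- B replaces A's pairwise 28-pair scan by row/diagonal/anti-diagonal frequency tabulation
-- (sum of c*(c-1)//2 over bucket sizes) and builds neighbour boards by slicing in a
-- comprehension with sorted(); objective: alternative (same cost, different algorithm).

-- ===== PORT A =====
-- helper 'heuristic' of Source A: pairwise scan over the 28 queen pairs
def pyHeuristic (board : List Int) : Int :=
  (PySem.List.pyRange 0 8 1).foldl (fun h i =>
    (PySem.List.pyRange (i + 1) 8 1).foldl (fun h j =>
      let h1 := if PySem.List.pyGetD board i 0 = PySem.List.pyGetD board j 0 then h + 1 else h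
      if (i - j).natAbs = (PySem.List.pyGetD board i 0 - PySem.List.pyGetD board j 0).natAbs
      then h1 + 1 else h1) h) 0

def generate_neighbours_with_heuristic (board : List Int) : List (List Int × Int) :=
  let res := (PySem.List.pyRange 0 8 1).foldl (fun acc i =>
    (PySem.List.pyRange 0 8 1).foldl (fun acc j =>
      if PySem.List.pyGetD board i 0 ≠ j then
        let nb := PySem.List.pySetD board i j
        acc ++ [(nb, pyHeuristic nb)]
      else acc) acc) []
  PySem.List.sorted res (fun x => x.2) false

-- ===== PORT B =====
-- helper '_conflicts' of Source B: one tabulation pass into three frequency dicts, then sum c*(c-1)//2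
def altConflicts (board : List Int) : Int :=
  let t := (PySem.List.pyRange 0 8 1).foldl
    (fun (t : PySem.Dict Int Int × PySem.Dict Int Int × PySem.Dict Int Int) i =>
      let v := PySem.List.pyGetD board i 0
      (t.1.insert v (t.1.getD v 0 + 1),
       t.2.1.insert (i - v) (t.2.1.getD (i - v) 0 + 1),
       t.2.2.insert (i + v) (t.2.2.getD (i + v) 0 + 1)))
    (PySem.Dict.empty, PySem.Dict.empty, PySem.Dict.empty)
  (t.1.values ++ t.2.1.values ++ t.2.2.values).foldl
    (fun total c => total + PySem.Int.floordiv (c * (c - 1)) 2) 0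

def generate_neighbours_with_heuristic_alt (board : List Int) : List (List Int × Int) :=
  let boards := (PySem.List.pyRange 0 8 1).flatMap (fun i =>
    (PySem.List.pyRange 0 8 1).flatMap (fun j =>
      if PySem.List.pyGetD board i 0 ≠ j then
        [PySem.List.slice board none (some i) ++ [j] ++ PySem.List.slice board (some (i + 1)) none]
      else []))
  PySem.List.sorted (boards.map (fun nb => (nb, altConflicts nb))) (fun p => p.2) false

-- ===== PRECONDITION & SPEC =====
-- Python A indexes board[0..7]; on boards shorter than 8 it raises IndexError, so those are excluded.
def Pre_generate_neighbours_with_heuristic (board : List Int) : Prop := 8 ≤ board.length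
instance (board : List Int) : Decidable (Pre_generate_neighbours_with_heuristic board) := by unfold Pre_generate_neighbours_with_heuristic; infer_instance
def pvWitness_generate_neighbours_with_heuristic : List Int := [0, 1, 2, 3, 4, 5, 6, 7]

def Spec_generate_neighbours_with_heuristic (board : List Int) (out : List (List Int × Int)) : Prop := out = generate_neighbours_with_heuristic_alt board
instance (board : List Int) (out : List (List Int × Int)) : Decidable (Spec_generate_neighbours_with_heuristic board out) := by unfold Spec_generate_neighbours_with_heuristic; infer_instance

-- ===== CLAIM (what is proved, stated in full; the proofs are below) =====
def Claim_equal_generate_neighbours_with_heuristic : Prop := ∀ (board : List Int), Dom_generate_neighbours_with_heuristic board → Pre_generate_neighbours_with_heuristic board → Spec_generate_neighbours_with_heuristic board (generate_neighbours_with_heuristic board)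

-- ===== LEMMAS AND PROOFS =====

-- number of unordered pairs of equal elements in a list of keys
def pairCnt : List Int → Int
  | [] => 0
  | k :: t => (t.count k : Int) + pairCnt t

def rowKeys (b : List Int) : List Int := (PySem.List.pyRange 0 8 1).map (fun i => PySem.List.pyGetD b i 0)
def diagKeys (b : List Int) : List Int := (PySem.List.pyRange 0 8 1).map (fun i => i - PySem.List.pyGetD b i 0)
def antiKeys (b : List Int) : List Int := (PySem.List.pyRange 0 8 1).map (fun i => i + PySem.List.pyGetD b i 0)

lemma pairCnt_append_singleton (ks : List Int) (x : Int) :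
    pairCnt (ks ++ [x]) = pairCnt ks + (ks.count x : Int) := by
  induction ks with
  | nil => simp [pairCnt]
  | cons a t ih =>
    simp only [List.cons_append, pairCnt, ih, List.count_append, List.count_cons, beq_iff_eq]
    by_cases h : x = a
    · subst h; simp; ring
    · rw [if_neg h, if_neg (fun hh => h hh.symm)]; simp; ring

-- sum over a Nodup list where the summand changes at exactly one member
lemma sum_map_update_one {l : List Int} (hn : l.Nodup) {x : Int} (hx : x ∈ l)
    (f g : Int → Int) (hfg : ∀ k ∈ l, k ≠ x → f k = g k) :
    (l.map f).sum = (l.map g).sum + (f x - g x) := by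
  induction l with
  | nil => cases hx
  | cons a t ih =>
    rcases List.mem_cons.1 hx with h | h
    · subst h
      have : t.map f = t.map g := List.map_congr_left (fun k hk =>
        hfg k (List.mem_cons_of_mem _ hk) (by rintro rfl; exact (List.nodup_cons.1 hn).1 hk))
      simp [this]; ring
    · have hax : a ≠ x := by rintro rfl; exact (List.nodup_cons.1 hn).1 h
      have ht := ih (List.nodup_cons.1 hn).2 h (fun k hk hkx => hfg k (List.mem_cons_of_mem _ hk) hkx)
      rw [List.map_cons, List.map_cons, List.sum_cons, List.sum_cons,
        hfg a List.mem_cons_self hax, ht]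
      ring

-- step identity for the triangular numbers under Python floor division
lemma floordiv_tri_step (c : Int) :
    PySem.Int.floordiv ((c + 1) * c) 2 = PySem.Int.floordiv (c * (c - 1)) 2 + c := by
  rw [PySem.Int.floordiv_eq_ediv_of_pos (by norm_num), PySem.Int.floordiv_eq_ediv_of_pos (by norm_num)]
  obtain ⟨k, hk⟩ := Int.even_mul_succ_self (c - 1)
  obtain ⟨m, hm⟩ := Int.even_mul_succ_self c
  have h1 : c * (c - 1) = 2 * k := by linear_combination hk
  have h2 : (c + 1) * c = 2 * m := by linear_combination hm
  have h3 : (c + 1) * c = c * (c - 1) + 2 * c := by ring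
  omega

-- the bucket-sum of C(count,2) over the distinct keys equals the pair count
lemma sumC2_eq_pairCnt (ks : List Int) :
    ((PySem.Set.ofList ks).map
      (fun k => PySem.Int.floordiv ((ks.count k : Int) * ((ks.count k : Int) - 1)) 2)).sum
    = pairCnt ks := by
  induction ks using List.reverseRecOn with
  | nil => simp [pairCnt]
  | append_singleton ks x ih =>
    rw [pairCnt_append_singleton, PySem.Set.ofList_append_singleton]
    by_cases hx : x ∈ ks
    · rw [PySem.Set.add_of_mem (by exact (PySem.Set.mem_ofList _ _).2 hx)]
      have hnd := PySem.Set.nodup_ofList (xs := ks)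
      rw [sum_map_update_one hnd ((PySem.Set.mem_ofList _ _).2 hx)
        (fun k => PySem.Int.floordiv (((ks ++ [x]).count k : Int) * (((ks ++ [x]).count k : Int) - 1)) 2)
        (fun k => PySem.Int.floordiv ((ks.count k : Int) * ((ks.count k : Int) - 1)) 2)
        (fun k _ hk => by
          have : (ks ++ [x]).count k = ks.count k := by
            simp [List.count_append, List.count_singleton]
            intro h; exact absurd h.symm hk
          simp only [this]), ih]
      have hc : ((ks ++ [x]).count x : Int) = (ks.count x : Int) + 1 := by
        simp [List.count_append]
      rw [hc]
      have := floordiv_tri_step (ks.count x : Int)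
      have he : ((ks.count x : Int) + 1 - 1) = (ks.count x : Int) := by ring
      rw [he]
      omega
    · rw [PySem.Set.add_of_not_mem (by simp [PySem.Set.mem_ofList _ x, hx])]
      rw [List.map_append, List.sum_append]
      have h1 : (PySem.Set.ofList ks).map
          (fun k => PySem.Int.floordiv (((ks ++ [x]).count k : Int) * (((ks ++ [x]).count k : Int) - 1)) 2)
          = (PySem.Set.ofList ks).map
          (fun k => PySem.Int.floordiv ((ks.count k : Int) * ((ks.count k : Int) - 1)) 2) := by
        apply List.map_congr_left
        intro k hk
        have hkx : k ≠ x := by rintro rfl; exact hx ((PySem.Set.mem_ofList _ _).1 hk)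
        have : (ks ++ [x]).count k = ks.count k := by
          simp [List.count_append, List.count_singleton]
          intro h; exact absurd h.symm hkx
        simp only [this]
      rw [h1, ih]
      have hcx : (ks.count x) = 0 := List.count_eq_zero.2 hx
      have hcx2 : ((ks ++ [x]).count x) = 1 := by simp [List.count_append, hcx]
      simp [hcx, PySem.Int.floordiv]

-- a 0/1-sum of equal-key tests against a fixed i is the count of key i in the key list
lemma countEq_sum (key : Int → Int) (i : Int) (l : List Int) :
    ((l.map (fun j => if key i = key j then (1 : Int) else 0)).sum)
      = ((l.map key).count (key i) : Int) := by
  induction l with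
  | nil => simp
  | cons a t ih =>
    simp only [List.map_cons, List.sum_cons, ih, List.count_cons, beq_iff_eq]
    by_cases h : key i = key a
    · rw [if_pos h, if_pos h.symm]; push_cast; ring
    · rw [if_neg h, if_neg (fun hh => h hh.symm)]; push_cast; ring

-- the triangular double loop over equal-key tests is the pair count of the key list
lemma pairSum (key : Int → Int) (b : Int) : ∀ (n : Nat) (a : Int), (b - a).toNat = n →
    (((PySem.List.pyRange a b 1).map (fun i =>
        ((PySem.List.pyRange (i + 1) b 1).map
          (fun j => if key i = key j then (1 : Int) else 0)).sum)).sum)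
    = pairCnt ((PySem.List.pyRange a b 1).map key) := by
  intro n
  induction n with
  | zero =>
    intro a ha
    rw [PySem.List.pyRange_one_eq_nil (by omega)]
    simp [pairCnt]
  | succ n ih =>
    intro a ha
    have hab : a < b := by omega
    rw [PySem.List.pyRange_one_cons hab]
    simp only [List.map_cons, List.sum_cons, pairCnt]
    rw [ih (a + 1) (by omega), countEq_sum]

-- A's heuristic as three pair counts (row / main diagonal / anti-diagonal keys)
lemma pyHeuristic_eq (b : List Int) :
    pyHeuristic b = pairCnt (rowKeys b) + pairCnt (diagKeys b) + pairCnt (antiKeys b) := by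
  unfold pyHeuristic
  have hinner : ∀ i : Int, ∀ h : Int,
      (PySem.List.pyRange (i + 1) 8 1).foldl (fun h j =>
        let h1 := if PySem.List.pyGetD b i 0 = PySem.List.pyGetD b j 0 then h + 1 else h
        if (i - j).natAbs = (PySem.List.pyGetD b i 0 - PySem.List.pyGetD b j 0).natAbs
        then h1 + 1 else h1) h
      = h + ((PySem.List.pyRange (i + 1) 8 1).map (fun j =>
          ((if PySem.List.pyGetD b i 0 = PySem.List.pyGetD b j 0 then (1:Int) else 0)
            + (if i - PySem.List.pyGetD b i 0 = j - PySem.List.pyGetD b j 0 then (1:Int) else 0))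
            + (if i + PySem.List.pyGetD b i 0 = j + PySem.List.pyGetD b j 0 then (1:Int) else 0))).sum := by
    intro i h
    have hg : ∀ (acc j : Int), j ∈ PySem.List.pyRange (i + 1) 8 1 →
        (let h1 := if PySem.List.pyGetD b i 0 = PySem.List.pyGetD b j 0 then acc + 1 else acc
         if (i - j).natAbs = (PySem.List.pyGetD b i 0 - PySem.List.pyGetD b j 0).natAbs
         then h1 + 1 else h1)
        = acc + (((if PySem.List.pyGetD b i 0 = PySem.List.pyGetD b j 0 then (1:Int) else 0)
            + (if i - PySem.List.pyGetD b i 0 = j - PySem.List.pyGetD b j 0 then (1:Int) else 0))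
            + (if i + PySem.List.pyGetD b i 0 = j + PySem.List.pyGetD b j 0 then (1:Int) else 0)) := by
      intro acc j hj
      have hij : i < j := by
        have := (PySem.List.mem_pyRange_one.1 hj).1
        omega
      simp only []
      split_ifs with h1 h2 h3 h4 h5 h6 h7 <;> omega
    rw [PySem.List.foldl_congr_mem _ _
      (fun acc j => acc + (((if PySem.List.pyGetD b i 0 = PySem.List.pyGetD b j 0 then (1:Int) else 0)
            + (if i - PySem.List.pyGetD b i 0 = j - PySem.List.pyGetD b j 0 then (1:Int) else 0))
            + (if i + PySem.List.pyGetD b i 0 = j + PySem.List.pyGetD b j 0 then (1:Int) else 0)))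
      _ (fun acc j hj => hg acc j hj), PySem.List.foldl_add]
  rw [PySem.List.foldl_congr_mem _ _
    (fun h i => h + ((PySem.List.pyRange (i + 1) 8 1).map (fun j =>
          ((if PySem.List.pyGetD b i 0 = PySem.List.pyGetD b j 0 then (1:Int) else 0)
            + (if i - PySem.List.pyGetD b i 0 = j - PySem.List.pyGetD b j 0 then (1:Int) else 0))
            + (if i + PySem.List.pyGetD b i 0 = j + PySem.List.pyGetD b j 0 then (1:Int) else 0))).sum)
    _ (fun acc i _ => hinner i acc), PySem.List.foldl_add]
  simp only [PySem.List.sum_map_add_int]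
  rw [zero_add]
  rw [pairSum (fun i => PySem.List.pyGetD b i 0) 8 8 0 rfl,
    pairSum (fun i => i - PySem.List.pyGetD b i 0) 8 8 0 rfl,
    pairSum (fun i => i + PySem.List.pyGetD b i 0) 8 8 0 rfl]
  rfl

-- B's insert/getD loop over the mapped keys is Counter of the key list
lemma counter_loop (key : Int → Int) (l : List Int) :
    l.foldl (fun (d : PySem.Dict Int Int) i => d.insert (key i) (d.getD (key i) 0 + 1)) PySem.Dict.empty
      = PySem.Dict.counter (l.map key) := by
  rw [← PySem.Dict.foldl_insert_getD_add_one_eq_counter, List.foldl_map]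

lemma values_counter_eq (ks : List Int) :
    (PySem.Dict.counter ks).values = (PySem.Set.ofList ks).map (fun k => (ks.count k : Int)) := by
  rw [PySem.Dict.values_eq_map_keys _ (PySem.Dict.nodup_keys_counter ks) 0, PySem.Dict.keys_counter]
  exact List.map_congr_left (fun k _ => PySem.Dict.getD_counter ks k)

lemma sum_vals (ks : List Int) :
    (((PySem.Dict.counter ks).values.map (fun c => PySem.Int.floordiv (c * (c - 1)) 2)).sum)
      = pairCnt ks := by
  rw [values_counter_eq, List.map_map, ← sumC2_eq_pairCnt ks]
  rfl

-- B's tabulated conflicts as the same three pair counts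
lemma altConflicts_eq (b : List Int) :
    altConflicts b = pairCnt (rowKeys b) + pairCnt (diagKeys b) + pairCnt (antiKeys b) := by
  unfold altConflicts
  rw [PySem.List.foldl_prod_mk
      (f := fun (d : PySem.Dict Int Int) i => d.insert (PySem.List.pyGetD b i 0) (d.getD (PySem.List.pyGetD b i 0) 0 + 1))
      (g := fun (t2 : PySem.Dict Int Int × PySem.Dict Int Int) i =>
        (t2.1.insert (i - PySem.List.pyGetD b i 0) (t2.1.getD (i - PySem.List.pyGetD b i 0) 0 + 1),
         t2.2.insert (i + PySem.List.pyGetD b i 0) (t2.2.getD (i + PySem.List.pyGetD b i 0) 0 + 1)))]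
  rw [PySem.List.foldl_prod_mk
      (f := fun (d : PySem.Dict Int Int) i => d.insert (i - PySem.List.pyGetD b i 0) (d.getD (i - PySem.List.pyGetD b i 0) 0 + 1))
      (g := fun (d : PySem.Dict Int Int) i => d.insert (i + PySem.List.pyGetD b i 0) (d.getD (i + PySem.List.pyGetD b i 0) 0 + 1))]
  rw [counter_loop (fun i => PySem.List.pyGetD b i 0),
      counter_loop (fun i => i - PySem.List.pyGetD b i 0),
      counter_loop (fun i => i + PySem.List.pyGetD b i 0)]
  rw [PySem.List.foldl_add, zero_add, List.map_append, List.map_append,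
      List.sum_append, List.sum_append]
  rw [sum_vals, sum_vals, sum_vals]
  rfl

-- A's copy-and-assign board equals B's sliced board on long-enough boards
lemma nb_eq (b : List Int) (hb : 8 ≤ b.length) (i j : Int) (hi0 : 0 ≤ i) (hi8 : i < 8) :
    PySem.List.pySetD b i j
      = PySem.List.slice b none (some i) ++ [j] ++ PySem.List.slice b (some (i + 1)) none := by
  obtain ⟨n, rfl⟩ : ∃ n : Nat, i = (n : Int) := ⟨i.toNat, (Int.toNat_of_nonneg hi0).symm⟩
  have hn : n < b.length := by omega
  have hcast : ((n : Int) + 1) = ((n + 1 : Nat) : Int) := by push_cast; ring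
  rw [hcast, PySem.List.pySetD_natCast, PySem.List.slice_to_natCast, PySem.List.slice_from_natCast,
    List.set_eq_take_append_cons_drop, if_pos hn]
  simp

lemma flatMap_ite_singleton {α β : Type} (p : α → Prop) [DecidablePred p] (f : α → β) (l : List α) :
    l.flatMap (fun x => if p x then [f x] else [])
      = (l.filter (fun x => decide (p x))).map f := by
  induction l with
  | nil => simp
  | cons a t ih =>
    by_cases h : p a <;> simp [List.flatMap_cons, ih, h]

lemma ports_agree (board : List Int) (hpre : 8 ≤ board.length) :
    generate_neighbours_with_heuristic board = generate_neighbours_with_heuristic_alt board := by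
  unfold generate_neighbours_with_heuristic generate_neighbours_with_heuristic_alt
  simp only []
  congr 1
  rw [List.map_flatMap]
  rw [PySem.List.foldl_congr_mem _ _
    (fun acc i => acc ++ ((PySem.List.pyRange 0 8 1).filter
        (fun j => decide (PySem.List.pyGetD board i 0 ≠ j))).map
        (fun j => (PySem.List.pySetD board i j, pyHeuristic (PySem.List.pySetD board i j))))
    _ (fun acc i _ => PySem.List.foldl_append_ite _ _ _ _),
    PySem.List.foldl_append_eq_flatMap, List.nil_append]
  apply List.flatMap_congr
  intro i hi
  have hi' := PySem.List.mem_pyRange_one.1 hi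
  rw [flatMap_ite_singleton, List.map_map]
  apply List.map_congr_left
  intro j hj
  have hnb := nb_eq board hpre i j hi'.1 hi'.2
  rw [Function.comp, ← hnb, pyHeuristic_eq, ← altConflicts_eq]

-- ===== VERDICT (by name: the statement is the Claim_ definition above) =====
theorem generate_neighbours_with_heuristic_spec : Claim_equal_generate_neighbours_with_heuristic := by
  intro board _ hpre
  exact ports_agree board hpre
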